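-- pv_equiv track=rewrite | github.com/mkg789/Talent-Teams | Team size HackerRank Solution.py | teamSize
-- ===== SOURCE A (Python) =====
-- def teamSize(talent, talentsCount):
--     n = len(talent)
--     ans = []
--     sublists = []
--
--     for start in range(n):
--         for end in range(start + 1, n + 1):
--             l = []
--             count = 0
--
--             if len(talent[start:end]) >= talentsCount:
--                 for i in (talent[start:end]):
--                     if i not in l:
--                         l.append(i)
--                         count += 1
--                 if count == talentsCount:
--                     sublists.append(talent[start:end])
--                     break
--     for i in sublists:
--         ans.append((len(i)))
--     while len(ans) != len(talent):
--         ans.append(-1)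
--
--     return ans
-- ===== SOURCE B (Python) =====
-- def teamSize(talent, talentsCount):
--     n = len(talent)
--     lengths = []
--     for start in range(n):
--         seen = set()
--         for j in range(start, n):
--             seen.add(talent[j])
--             if len(seen) == talentsCount:
--                 lengths.append(j - start + 1)
--                 break
--     return lengths + [-1] * (n - len(lengths))
-- ===== Notes on version B (the rewrite author's own statement) =====
-- stated objective: faster
-- what changed: Replaces A's triple loop (for each start, for each end, rebuild the distinct-element list of the whole slice from scratch) with a single incremental set scan per start that stops as soon as the distinct count reaches talentsCount, and pads with list arithmetic instead of a while loop.
import Mathlib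
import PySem

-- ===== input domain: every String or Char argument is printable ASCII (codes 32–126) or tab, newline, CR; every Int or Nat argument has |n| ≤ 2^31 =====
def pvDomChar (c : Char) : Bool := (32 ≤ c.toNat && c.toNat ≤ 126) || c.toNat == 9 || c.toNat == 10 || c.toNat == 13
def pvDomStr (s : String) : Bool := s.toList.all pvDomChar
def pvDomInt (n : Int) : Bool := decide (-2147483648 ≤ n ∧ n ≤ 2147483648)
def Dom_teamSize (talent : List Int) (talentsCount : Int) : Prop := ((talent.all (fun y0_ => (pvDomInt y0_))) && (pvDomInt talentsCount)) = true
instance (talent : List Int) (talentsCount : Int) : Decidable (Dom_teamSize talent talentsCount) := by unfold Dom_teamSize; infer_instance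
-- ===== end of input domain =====

-- B replaces A's per-window rebuild of the distinct list (O(n^3)) by ONE incremental
-- set scan per start (O(n^2)); objective: faster (asymptotic). Return values only; neither mutates.

-- ===== PORT A =====
-- inner 'for i in talent[start:end]: if i not in l: l.append(i); count += 1'
def pvCountLoop (xs : List Int) : List Int × Int :=
  xs.foldl (fun (st : List Int × Int) i =>
    if i ∈ st.1 then st else (st.1 ++ [i], st.2 + 1)) ([], 0)

-- inner 'for end in range(start+1, n+1): … break' loop, over the remaining list of end values
def pvFindWindow (talent : List Int) (talentsCount : Int) (start : Int) :
    List Int → Option (List Int)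
  | [] => none
  | e :: rest =>
    let w := PySem.List.slice talent (some start) (some e)
    if talentsCount ≤ (w.length : Int) then
      if (pvCountLoop w).2 = talentsCount then some w
      else pvFindWindow talent talentsCount start rest
    else pvFindWindow talent talentsCount start rest

-- Python's final 'while len(ans) != len(talent): ans.append(-1)'; when ans.length > n Python
-- diverges — unreachable here (at most one sublist per start), so the port stops there.
def pvPadLoop (n : Nat) (ans : List Int) : List Int :=
  if h : ans.length < n then pvPadLoop n (ans ++ [-1]) else ans
termination_by n - ans.length
decreasing_by simp; omega

-- one outer-loop iteration: append talent[start:end] to sublists if the inner loop broke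
def pvOuterStep (talent : List Int) (talentsCount n : Int)
    (acc : List (List Int)) (start : Int) : List (List Int) :=
  match pvFindWindow talent talentsCount start (PySem.List.pyRange (start + 1) (n + 1) 1) with
  | some w => acc ++ [w]
  | none => acc

def teamSize (talent : List Int) (talentsCount : Int) : List Int :=
  let n : Int := (talent.length : Int)
  let sublists := (PySem.List.pyRange 0 n 1).foldl (pvOuterStep talent talentsCount n) []
  let ans := sublists.map (fun w => (w.length : Int))
  pvPadLoop talent.length ans

-- ===== PORT B =====
-- inner 'for x in talent[start:]: seen.add(x); length += 1; if len(seen) == talentsCount: … break'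
def pvScan (talentsCount : Int) : PySem.Set Int → Int → List Int → Option Int
  | _, _, [] => none
  | seen, length, x :: rest =>
    let s := PySem.Set.add seen x
    if PySem.Set.len s = talentsCount then some (length + 1)
    else pvScan talentsCount s (length + 1) rest

def teamSize_alt (talent : List Int) (talentsCount : Int) : List Int :=
  let n := talent.length
  let lengths := (List.range n).filterMap
    (fun start => pvScan talentsCount PySem.Set.empty 0 (talent.drop start))
  lengths ++ List.replicate (n - lengths.length) (-1)

-- ===== PRECONDITION & SPEC =====
def Spec_teamSize (talent : List Int) (talentsCount : Int) (out : List Int) : Prop := out = teamSize_alt talent talentsCount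
instance (talent : List Int) (talentsCount : Int) (out : List Int) : Decidable (Spec_teamSize talent talentsCount out) := by unfold Spec_teamSize; infer_instance

-- ===== CLAIM (what is proved, stated in full; the proofs are below) =====
def Claim_equal_teamSize : Prop := ∀ (talent : List Int) (talentsCount : Int), Dom_teamSize talent talentsCount → Spec_teamSize talent talentsCount (teamSize talent talentsCount)

-- ===== LEMMAS AND PROOFS =====

-- A's distinct-list loop computes Set.update: same membership test, same append.
theorem pvCountLoop_eq_update (xs l : List Int) :
    xs.foldl (fun (st : List Int × Int) i =>
      if i ∈ st.1 then st else (st.1 ++ [i], st.2 + 1)) (l, (l.length : Int))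
    = (PySem.Set.update l xs, ((PySem.Set.update l xs).length : Int)) := by
  induction xs generalizing l with
  | nil => simp [PySem.Set.update]
  | cons x xs ih =>
    have hstep : (if x ∈ l then (l, (l.length : Int)) else (l ++ [x], (l.length : Int) + 1))
        = (PySem.Set.add l x, ((PySem.Set.add l x).length : Int)) := by
      by_cases hx : x ∈ l <;> simp [PySem.Set.add, PySem.Set.contains, hx]
    have hupd : PySem.Set.update l (x :: xs) = PySem.Set.update (PySem.Set.add l x) xs := by
      simp [PySem.Set.update]
    simp only [List.foldl_cons, hstep, ih, hupd]

theorem pvCountLoop_snd (xs : List Int) :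
    (pvCountLoop xs).2 = ((PySem.Set.ofList xs).length : Int) := by
  have := pvCountLoop_eq_update xs []
  simp only [pvCountLoop, List.length_nil, Nat.cast_zero] at this ⊢
  rw [this]
  simp [PySem.Set.ofList, PySem.Set.update, PySem.Set.empty]

theorem set_ofList_snoc (p : List Int) (x : Int) :
    PySem.Set.ofList (p ++ [x]) = PySem.Set.add (PySem.Set.ofList p) x := by
  simp [PySem.Set.ofList, List.foldl_append]

theorem set_ofList_length_le (xs : List Int) :
    (PySem.Set.ofList xs).length ≤ xs.length := by
  suffices h : ∀ (xs l : List Int), (PySem.Set.update l xs).length ≤ l.length + xs.length by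
    simpa [PySem.Set.ofList, PySem.Set.update, PySem.Set.empty] using h xs []
  intro xs
  induction xs with
  | nil => simp [PySem.Set.update]
  | cons x xs ih =>
    intro l
    have h1 : (PySem.Set.add l x).length ≤ l.length + 1 := by
      by_cases hx : x ∈ l <;> simp [PySem.Set.add, hx]
    have h2 := ih (PySem.Set.add l x)
    have : PySem.Set.update l (x :: xs) = PySem.Set.update (PySem.Set.add l x) xs := by
      simp [PySem.Set.update]
    rw [this]; simp only [List.length_cons]; omega

-- per-start equivalence: A's end-loop over the remaining range equals B's incremental scan
theorem perStart (talent : List Int) (k : Int) (start : Nat) :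
    ∀ (q p : List Int), talent.drop start = p ++ q →
    (pvFindWindow talent k (start : Int)
        (PySem.List.pyRange ((start : Int) + p.length + 1) ((talent.length : Int) + 1) 1)).map
      (fun w => (w.length : Int))
    = pvScan k (PySem.Set.ofList p) (p.length : Int) q := by
  intro q
  induction q with
  | nil =>
    intro p hd
    have hlen : start + p.length ≥ talent.length := by
      have := congrArg List.length hd
      simp [List.length_drop] at this
      omega
    rw [PySem.List.pyRange_one_eq_nil (by omega)]
    simp [pvFindWindow, pvScan]
  | cons x q ih =>
    intro p hd
    have hlen : start + p.length + 1 + q.length = talent.length := by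
      have := congrArg List.length hd
      simp [List.length_drop] at this
      have hle : start ≤ talent.length := by
        by_contra hc
        rw [List.drop_eq_nil_of_le (by omega)] at hd
        simp at hd
      omega
    rw [PySem.List.pyRange_one_cons (by omega)]
    have hw : PySem.List.slice talent (some (start : Int)) (some ((start : Int) + p.length + 1))
        = p ++ [x] := by
      rw [PySem.List.slice_toNat (xs := talent) (by positivity) (by positivity)]
      have h1 : ((start : Int) + p.length + 1).toNat = start + (p.length + 1) := by omega
      have h2 : (start : Int).toNat = start := by omega
      rw [h1, h2, hd]
      have h3 : start + (p.length + 1) - start = p.length + 1 := by omega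
      rw [h3]
      simp [List.take_append]
    have hcount : (pvCountLoop (p ++ [x])).2 = ((PySem.Set.ofList (p ++ [x])).length : Int) :=
      pvCountLoop_snd _
    have hset : PySem.Set.add (PySem.Set.ofList p) x = PySem.Set.ofList (p ++ [x]) :=
      (set_ofList_snoc p x).symm
    by_cases hk : ((PySem.Set.ofList (p ++ [x])).length : Int) = k
    · have hle : k ≤ (p.length : Int) + 1 := by
        have := set_ofList_length_le (p ++ [x])
        have h2 : (p ++ [x]).length = p.length + 1 := by simp
        omega
      simp [pvFindWindow, pvScan, hw, hcount, hk, PySem.Set.len, hset, hle]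
    · have hrec := ih (p ++ [x]) (by rw [hd, List.append_assoc]; rfl)
      simp only [pvFindWindow, pvScan, hw, hcount]
      rw [if_neg hk, ite_self, hset]
      rw [if_neg (show ¬ PySem.Set.len (PySem.Set.ofList (p ++ [x])) = k by
            simpa [PySem.Set.len] using hk)]
      simp only [List.length_append, List.length_cons, List.length_nil] at hrec
      push_cast at hrec ⊢
      ring_nf at hrec ⊢
      exact hrec

-- A's outer fold, mapped to lengths, is a filterMap
theorem fold_outer_filterMap (talent : List Int) (k n : Int) :
    ∀ (xs : List Int) (acc : List (List Int)),
    (xs.foldl (pvOuterStep talent k n) acc).map (fun w => (w.length : Int))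
      = acc.map (fun w => (w.length : Int))
        ++ xs.filterMap (fun s =>
            (pvFindWindow talent k s (PySem.List.pyRange (s + 1) (n + 1) 1)).map
              (fun w => (w.length : Int))) := by
  intro xs
  induction xs with
  | nil => simp
  | cons x xs ih =>
    intro acc
    cases hx : pvFindWindow talent k x (PySem.List.pyRange (x + 1) (n + 1) 1) <;>
      simp [List.foldl_cons, pvOuterStep, hx, ih]

-- the padding loop appends exactly the missing -1s
theorem pvPadLoop_eq (n : Nat) : ∀ (k : Nat) (ans : List Int), ans.length + k = n →
    pvPadLoop n ans = ans ++ List.replicate k (-1) := by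
  intro k
  induction k with
  | zero =>
    intro ans h
    rw [pvPadLoop]
    simp [show ¬ ans.length < n by omega]
  | succ k ih =>
    intro ans h
    rw [pvPadLoop]
    have : ans.length < n := by omega
    simp only [this, dite_true]
    rw [ih (ans ++ [-1]) (by simp; omega)]
    simp [List.replicate_succ]

-- ===== VERDICT (by name: the statement is the Claim_ definition above) =====
-- filterMap respects pointwise-equal functions
theorem filterMap_congr' {α β : Type} {f g : α → Option β} :
    ∀ (l : List α), (∀ x ∈ l, f x = g x) → l.filterMap f = l.filterMap g := by
  intro l
  induction l with
  | nil => intro _; rfl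
  | cons x xs ih =>
    intro h
    simp only [List.filterMap_cons, h x (by simp), ih (fun y hy => h y (by simp [hy]))]

theorem teamSize_spec : Claim_equal_teamSize := by
  intro talent k _
  unfold Spec_teamSize teamSize teamSize_alt
  simp only
  rw [fold_outer_filterMap, List.map_nil, List.nil_append,
      PySem.List.pyRange_zero_nat, List.filterMap_map]
  have hcong : (List.range talent.length).filterMap
      ((fun s => (pvFindWindow talent k s
          (PySem.List.pyRange (s + 1) ((talent.length : Int) + 1) 1)).map
        (fun w => ((w.length : Nat) : Int))) ∘ (fun m : Nat => (m : Int)))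
      = (List.range talent.length).filterMap
        (fun start => pvScan k PySem.Set.empty 0 (talent.drop start)) := by
    apply filterMap_congr'
    intro start _
    have := perStart talent k start (talent.drop start) [] (by simp)
    simpa [PySem.Set.ofList, PySem.Set.empty] using this
  rw [hcong]
  set L := (List.range talent.length).filterMap
      (fun start => pvScan k PySem.Set.empty 0 (talent.drop start)) with hL
  have hlen : L.length ≤ talent.length := by
    have := List.length_filterMap_le
      (fun start => pvScan k PySem.Set.empty 0 (talent.drop start)) (List.range talent.length)
    simpa [hL] using this
  exact pvPadLoop_eq talent.length (talent.length - L.length) L (by omega)
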